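-- pv_equiv track=rewrite | github.com/Navodhya-Fernando/dreamshift-ems | src/chat_ui.py | calculate_thread_depth
-- ===== SOURCE A (Python) =====
-- def calculate_thread_depth(comment_id: str, children_map: dict, depth: int = 0) -> int:
--     """Calculate the maximum depth of a comment thread."""
--     if comment_id not in children_map:
--         return depth
--
--     max_child_depth = depth
--     for child in children_map.get(comment_id, []):
--         child_depth = calculate_thread_depth(str(child["_id"]), children_map, depth + 1)
--         max_child_depth = max(max_child_depth, child_depth)
--
--     return max_child_depth
-- ===== SOURCE B (Python) =====
-- def calculate_thread_depth(comment_id: str, children_map: dict, depth: int = 0) -> int: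
--     """Calculate the maximum depth of a comment thread (iterative level-by-level BFS)."""
--     level = [comment_id]
--     while True:
--         nxt = []
--         for node in level:
--             if node in children_map:
--                 for child in children_map[node]:
--                     nxt.append(str(child["_id"]))
--         if not nxt:
--             return depth
--         level = nxt
--         depth += 1
-- ===== Notes on version B (the rewrite author's own statement) =====
-- stated objective: alternative
-- what changed: Replaced A's recursive depth-first max over each subtree with an iterative breadth-first level-by-level expansion: B keeps a frontier list, expands all children of one level per round, and returns depth when a level produces no children (max depth = number of rounds).
import Mathlib
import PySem

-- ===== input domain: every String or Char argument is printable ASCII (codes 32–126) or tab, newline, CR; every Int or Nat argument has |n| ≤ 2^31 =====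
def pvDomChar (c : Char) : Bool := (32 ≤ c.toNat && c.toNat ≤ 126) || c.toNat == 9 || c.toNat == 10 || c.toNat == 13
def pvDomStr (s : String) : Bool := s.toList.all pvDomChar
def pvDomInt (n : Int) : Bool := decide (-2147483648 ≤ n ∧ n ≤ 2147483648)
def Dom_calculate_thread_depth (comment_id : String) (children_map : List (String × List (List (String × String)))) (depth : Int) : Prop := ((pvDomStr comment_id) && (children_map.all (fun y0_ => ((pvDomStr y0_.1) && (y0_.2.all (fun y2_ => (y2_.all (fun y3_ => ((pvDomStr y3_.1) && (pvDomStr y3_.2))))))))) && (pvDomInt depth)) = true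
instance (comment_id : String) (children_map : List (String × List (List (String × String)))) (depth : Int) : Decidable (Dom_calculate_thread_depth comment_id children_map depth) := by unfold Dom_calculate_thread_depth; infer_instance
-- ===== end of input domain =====

-- B replaces A's recursive depth-first max with an iterative level-by-level (BFS) expansion of
-- frontiers; same cost, different decomposition (objective: alternative). Return-value equivalence only.

-- ===== PORT A =====
-- str(child["_id"]): the "_id" value is a string, so str() is the identity; a missing "_id" key is a
-- Python KeyError (get? = none) — such reachable children are excluded by Pre_, the "" default is
-- never reached on admitted inputs.
def pvChildId (c : List (String × String)) : String :=
  PySem.Dict.getD (PySem.Dict.mk c) "_id" ""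

-- A's recursion, made total with a fuel bound on recursion depth (children_map.length + 1, enough on
-- every input Pre_ admits; the fuel-0 branch returns depth, exactly A's base case, and is unreachable
-- under Pre_). 'comment_id not in children_map' and '.get(comment_id, [])' are the one dict lookup.
def pvRecA (m : List (String × List (List (String × String)))) : Nat → String → Int → Int
  | 0, _, depth => depth
  | fuel+1, comment_id, depth =>
    match PySem.Dict.get? (PySem.Dict.mk m) comment_id with
    | none => depth
    | some children =>
      children.foldl
        (fun max_child_depth child =>
          max max_child_depth (pvRecA m fuel (pvChildId child) (depth + 1)))
        depth

def calculate_thread_depth (comment_id : String) (children_map : List (String × List (List (String × String)))) (depth : Int) : Int :=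
  pvRecA children_map (children_map.length + 1) comment_id depth

-- ===== PORT B =====
-- one round of Source B's inner loops: collect the child ids of every frontier node that is a key
def pvStepB (m : List (String × List (List (String × String)))) (level : List String) : List String :=
  level.foldl
    (fun nxt node =>
      match PySem.Dict.get? (PySem.Dict.mk m) node with
      | none => nxt
      | some children => nxt ++ children.map pvChildId)
    []

-- Source B's 'while True' loop, made total with the same fuel bound (rounds ≤ longest path + 1,
-- ≤ children_map.length + 1 on every input Pre_ admits)
def pvLoopB (m : List (String × List (List (String × String)))) : Nat → List String → Int → Int
  | 0, _, depth => depth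
  | fuel+1, level, depth =>
    let nxt := pvStepB m level
    if nxt.isEmpty then depth else pvLoopB m fuel nxt (depth + 1)

def calculate_thread_depth_alt (comment_id : String) (children_map : List (String × List (List (String × String)))) (depth : Int) : Int :=
  pvLoopB children_map (children_map.length + 1) [comment_id] depth

-- ===== PRECONDITION & SPEC =====
-- helpers for Pre_: the key graph (key → child "_id") and its bounded reachability closure;
-- this computes reachability of KEYS, not the depth value either program computes.
def pvSuccs (m : List (String × List (List (String × String)))) (k : String) : List String :=
  match PySem.Dict.get? (PySem.Dict.mk m) k with
  | none => []
  | some cs => cs.map pvChildId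

def pvGrow (m : List (String × List (List (String × String)))) (s : List String) : List String :=
  s.foldl (fun acc k => (pvSuccs m k).foldl (fun a x => if x ∈ a then a else a ++ [x]) acc) s

def pvClosure (m : List (String × List (List (String × String)))) : Nat → List String → List String
  | 0, s => s
  | n+1, s => pvClosure m n (pvGrow m s)

def pvReach (m : List (String × List (List (String × String)))) (roots : List String) : List String :=
  pvClosure m (m.length + 1) roots

-- Pre_ excludes exactly the situations where the Python A raises — a cycle reachable from comment_id
-- (RecursionError) or a reachable child record without an "_id" field (KeyError) — stated on the
-- entries whose key is reachable from comment_id in the key graph; it also requires the association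
-- lists encoding the dicts to have distinct keys, as every real Python dict does (a duplicate-key
-- association list is a dict-encoding corner that no Python dict value corresponds to).
def Pre_calculate_thread_depth (comment_id : String) (children_map : List (String × List (List (String × String)))) (depth : Int) : Prop :=
  (children_map.map Prod.fst).Nodup ∧
  (∀ e ∈ children_map, ∀ c ∈ e.2, (c.map Prod.fst).Nodup) ∧
  (∀ e ∈ children_map, e.1 ∈ pvReach children_map [comment_id] →
     (∀ c ∈ e.2, (PySem.Dict.get? (PySem.Dict.mk c) "_id").isSome) ∧
     e.1 ∉ pvReach children_map (pvSuccs children_map e.1))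

instance (comment_id : String) (children_map : List (String × List (List (String × String)))) (depth : Int) : Decidable (Pre_calculate_thread_depth comment_id children_map depth) := by
  unfold Pre_calculate_thread_depth; infer_instance

def pvWitness_calculate_thread_depth : String × (List (String × List (List (String × String)))) × Int :=
  ("a", [("a", [[("_id", "b")]]), ("b", [])], 0)

def Spec_calculate_thread_depth (comment_id : String) (children_map : List (String × List (List (String × String)))) (depth : Int) (out : Int) : Prop := out = calculate_thread_depth_alt comment_id children_map depth
instance (comment_id : String) (children_map : List (String × List (List (String × String)))) (depth : Int) (out : Int) : Decidable (Spec_calculate_thread_depth comment_id children_map depth out) := by unfold Spec_calculate_thread_depth; infer_instance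

-- ===== CLAIM (what is proved, stated in full; the proofs are below) =====
def Claim_equal_calculate_thread_depth : Prop := ∀ (comment_id : String) (children_map : List (String × List (List (String × String)))) (depth : Int), Dom_calculate_thread_depth comment_id children_map depth → Pre_calculate_thread_depth comment_id children_map depth → Spec_calculate_thread_depth comment_id children_map depth (calculate_thread_depth comment_id children_map depth)

-- ===== LEMMAS AND PROOFS =====
-- The two ports are in fact equal at equal fuel on ALL inputs; Pre_ is only needed so that the
-- Python programs return at all (it is not used by the equality proof).

-- fold-of-max pulls a max out of its initial accumulator
theorem pv_foldmax_init {α : Type} (g : α → Int) (l : List α) :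
    ∀ a b : Int, l.foldl (fun x y => max x (g y)) (max a b) = max a (l.foldl (fun x y => max x (g y)) b) := by
  induction l with
  | nil => intro a b; simp
  | cons h t ih =>
    intro a b
    simp only [List.foldl_cons]
    rw [max_assoc, ih]

-- the accumulator only grows
theorem pv_foldmax_ge {α : Type} (g : α → Int) (l : List α) :
    ∀ a : Int, a ≤ l.foldl (fun x y => max x (g y)) a := by
  induction l with
  | nil => intro a; simp
  | cons h t ih => intro a; exact le_trans (le_max_left _ _) (ih _)

-- adding a constant to every entry and to the accumulator shifts the fold
theorem pv_foldmax_shift {α : Type} (h : α → Int) (l : List α) :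
    ∀ d b : Int, l.foldl (fun a c => max a (d + h c)) (d + b) = d + l.foldl (fun a c => max a (h c)) b := by
  induction l with
  | nil => intro d b; simp
  | cons x t ih =>
    intro d b
    simp only [List.foldl_cons]
    rw [max_add_add_left]
    exact ih d _

theorem pvRecA_shift (m : List (String × List (List (String × String)))) :
    ∀ (fuel : Nat) (k : String) (d : Int), pvRecA m fuel k d = d + pvRecA m fuel k 0 := by
  intro fuel
  induction fuel with
  | zero => intro k d; simp [pvRecA]
  | succ f ih =>
    intro k d
    simp only [pvRecA]
    cases hk : PySem.Dict.get? (PySem.Dict.mk m) k with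
    | none => simp
    | some cs =>
      simp only [zero_add]
      have h1 : (fun (a : Int) (c : List (String × String)) => max a (pvRecA m f (pvChildId c) (d + 1)))
          = fun a c => max a (d + (1 + pvRecA m f (pvChildId c) 0)) := by
        funext a c; rw [ih, add_assoc]
      have h2 : (fun (a : Int) (c : List (String × String)) => max a (pvRecA m f (pvChildId c) 1))
          = fun a c => max a (1 + pvRecA m f (pvChildId c) 0) := by
        funext a c; rw [ih]
      rw [h1, h2]
      have := pv_foldmax_shift (fun c => 1 + pvRecA m f (pvChildId c) 0) cs d 0
      simpa using this

theorem pvRecA_ge (m : List (String × List (List (String × String)))) :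
    ∀ (fuel : Nat) (k : String) (d : Int), d ≤ pvRecA m fuel k d := by
  intro fuel
  induction fuel with
  | zero => intro k d; simp [pvRecA]
  | succ f ih =>
    intro k d
    simp only [pvRecA]
    cases hk : PySem.Dict.get? (PySem.Dict.mk m) k with
    | none => simp
    | some cs => exact pv_foldmax_ge _ cs d

theorem pvLoopB_shift (m : List (String × List (List (String × String)))) :
    ∀ (fuel : Nat) (level : List String) (d : Int), pvLoopB m fuel level d = d + pvLoopB m fuel level 0 := by
  intro fuel
  induction fuel with
  | zero => intro level d; simp [pvLoopB]
  | succ f ih =>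
    intro level d
    simp only [pvLoopB]
    by_cases hnx : (pvStepB m level).isEmpty
    · rw [if_pos hnx, if_pos hnx]; simp
    · rw [if_neg hnx, if_neg hnx, ih _ (d + 1), ih _ (0 + 1)]
      ring

-- Source B's inner double loop, as a flatMap
theorem pvStepB_flat (m : List (String × List (List (String × String)))) (level : List String) :
    pvStepB m level = level.flatMap (fun k =>
      match PySem.Dict.get? (PySem.Dict.mk m) k with
      | none => []
      | some cs => cs.map pvChildId) := by
  suffices h : ∀ (lv acc : List String),
      List.foldl (fun nxt node =>
        match PySem.Dict.get? (PySem.Dict.mk m) node with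
        | none => nxt
        | some children => nxt ++ children.map pvChildId) acc lv
      = acc ++ lv.flatMap (fun k =>
        match PySem.Dict.get? (PySem.Dict.mk m) k with
        | none => []
        | some cs => cs.map pvChildId) by
    simpa [pvStepB] using h level []
  intro lv
  induction lv with
  | nil => intro acc; simp
  | cons x t ih =>
    intro acc
    simp only [List.foldl_cons, List.flatMap_cons]
    cases hx : PySem.Dict.get? (PySem.Dict.mk m) x with
    | none => simp only []; rw [ih]; simp
    | some cs => simp only []; rw [ih]; simp

-- the max of A's (fuel+1)-heights over a frontier equals the max of (1 + fuel-height) over the next frontier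
theorem pv_frontier_step (m : List (String × List (List (String × String)))) (fuel : Nat) :
    ∀ (cur : List String) (a : Int), 0 ≤ a →
      cur.foldl (fun x k => max x (pvRecA m (fuel + 1) k 0)) a
        = (pvStepB m cur).foldl (fun x s => max x (1 + pvRecA m fuel s 0)) a := by
  intro cur
  induction cur with
  | nil => intro a _; simp [pvStepB]
  | cons k t ih =>
    intro a ha
    rw [pvStepB_flat]
    simp only [List.flatMap_cons, List.foldl_cons, List.foldl_append]
    rw [← pvStepB_flat]
    have hhead : (match PySem.Dict.get? (PySem.Dict.mk m) k with
        | none => ([] : List String)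
        | some cs => cs.map pvChildId).foldl (fun x s => max x (1 + pvRecA m fuel s 0)) a
        = max a (pvRecA m (fuel + 1) k 0) := by
      cases hk : PySem.Dict.get? (PySem.Dict.mk m) k with
      | none =>
        simp only [List.foldl_nil]
        have : pvRecA m (fuel + 1) k 0 = 0 := by simp [pvRecA, hk]
        rw [this, max_eq_left ha]
      | some cs =>
        simp only [List.foldl_map]
        have hrec : pvRecA m (fuel + 1) k 0
            = cs.foldl (fun x c => max x (1 + pvRecA m fuel (pvChildId c) 0)) 0 := by
          simp only [pvRecA, hk]
          congr 1
          funext x c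
          rw [pvRecA_shift]
          norm_num
        rw [hrec]
        have := pv_foldmax_init (fun c => 1 + pvRecA m fuel (pvChildId c) 0) cs a 0
        rw [← this, max_eq_left ha]
    rw [hhead, ih (max a (pvRecA m (fuel + 1) k 0)) (le_trans ha (le_max_left _ _))]

-- pulling '1 +' out of a nonempty frontier max
theorem pv_foldmax_succ (h : String → Int) (hpos : ∀ s, 0 ≤ h s) :
    ∀ (l : List String), l ≠ [] →
      l.foldl (fun x s => max x (1 + h s)) 0 = 1 + l.foldl (fun x s => max x (h s)) 0 := by
  intro l hl
  cases l with
  | nil => exact absurd rfl hl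
  | cons x t =>
    simp only [List.foldl_cons]
    have h1 : max (0 : Int) (1 + h x) = 1 + h x := max_eq_right (by have := hpos x; omega)
    have h2 : max (0 : Int) (h x) = h x := max_eq_right (hpos x)
    rw [h1, h2]
    exact pv_foldmax_shift h t 1 (h x)

-- B's loop computes the max of A's heights over the frontier, at equal fuel, on every input
theorem pvLoopB_eq_foldmax (m : List (String × List (List (String × String)))) :
    ∀ (fuel : Nat) (cur : List String),
      pvLoopB m fuel cur 0 = cur.foldl (fun x k => max x (pvRecA m fuel k 0)) 0 := by
  intro fuel
  induction fuel with
  | zero =>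
    intro cur
    simp only [pvLoopB, pvRecA]
    induction cur with
    | nil => simp
    | cons x t ih => simpa using ih
  | succ f ih =>
    intro cur
    rw [pv_frontier_step m f cur 0 le_rfl]
    simp only [pvLoopB]
    by_cases hnx : (pvStepB m cur).isEmpty
    · rw [if_pos hnx, List.isEmpty_iff.mp hnx]
      simp
    · have hne : pvStepB m cur ≠ [] := by
        intro h0; exact hnx (by simp [h0])
      rw [if_neg hnx, zero_add, pvLoopB_shift m f _ 1, ih (pvStepB m cur),
        pv_foldmax_succ (fun s => pvRecA m f s 0) (fun s => pvRecA_ge m f s 0)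
          (pvStepB m cur) hne]

-- ===== VERDICT (by name: the statement is the Claim_ definition above) =====
theorem calculate_thread_depth_spec : Claim_equal_calculate_thread_depth := by
  intro comment_id children_map depth _ _
  unfold Spec_calculate_thread_depth calculate_thread_depth calculate_thread_depth_alt
  rw [pvRecA_shift, pvLoopB_shift, pvLoopB_eq_foldmax]
  simp only [List.foldl_cons, List.foldl_nil]
  rw [max_eq_right (pvRecA_ge children_map (children_map.length + 1) comment_id 0)]
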